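-- pv_equiv track=rewrite | github.com/MohiuddinSohel/Leetcoding | amazonOAPreparation/OA.py | getLargest_index_len_outliers
-- ===== SOURCE A (Python) =====
-- def getLargest_index_len_outliers(f1, f2):
--     # https://leetcode.com/company/amazon/discuss/5738176/Amazon-Online-Assessment-Aug-2024
--     max_len = 0
--     dp = [1] * len(f1)
--     for i in range(len(f1)):
--         for j in range(i):
--             if (f1[j] < f1[i] and f2[j] < f2[i]) or (f1[j] > f1[i] and f2[j] > f2[i]):
--                 dp[i] = max(dp[i], 1 + dp[j])
--         max_len = max(max_len, dp[i])
--     return max_len if max_len > 1 else -1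
-- ===== SOURCE B (Python) =====
-- def getLargest_index_len_outliers(f1, f2):
--     # Layered peeling ("BFS by chain length"): level k is the set of indices at
--     # which some concordant chain of length k ends; start with every index at
--     # level 1 and repeatedly advance a level by keeping the indices that have a
--     # concordant predecessor in the current level (levels can only shrink and
--     # stay in ascending index order, so the predecessor scan stops at j >= i);
--     # the answer is the number of nonempty levels (the deepest level reached).
--     pairs = list(zip(f1, f2))
--     cur = list(range(len(pairs)))
--     depth = 0
--     while cur:
--         depth += 1
--         nxt = []
--         for i in cur:
--             a, b = pairs[i]
--             for j in cur:
--                 if j >= i: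
--                     break
--                 c, d = pairs[j]
--                 if (c < a and d < b) or (c > a and d > b):
--                     nxt.append(i)
--                     break
--         cur = nxt
--     return depth if depth > 1 else -1
-- ===== Notes on version B (the rewrite author's own statement) =====
-- stated objective: alternative
-- what changed: B replaces A's per-index quadratic DP (dp[i] updated by scanning every earlier dp[j]) by layered peeling / BFS by chain length: no per-index scores are kept at all; a level set (indices where a concordant chain of length k ends) is repeatedly advanced, with the predecessor scan breaking at the first hit or at j >= i, and the answer is the number of nonempty levels.
-- outside the precondition, e.g. on getLargest_index_len_outliers([1, 2], [5]): A raises IndexError, B returns -1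
import Mathlib
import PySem

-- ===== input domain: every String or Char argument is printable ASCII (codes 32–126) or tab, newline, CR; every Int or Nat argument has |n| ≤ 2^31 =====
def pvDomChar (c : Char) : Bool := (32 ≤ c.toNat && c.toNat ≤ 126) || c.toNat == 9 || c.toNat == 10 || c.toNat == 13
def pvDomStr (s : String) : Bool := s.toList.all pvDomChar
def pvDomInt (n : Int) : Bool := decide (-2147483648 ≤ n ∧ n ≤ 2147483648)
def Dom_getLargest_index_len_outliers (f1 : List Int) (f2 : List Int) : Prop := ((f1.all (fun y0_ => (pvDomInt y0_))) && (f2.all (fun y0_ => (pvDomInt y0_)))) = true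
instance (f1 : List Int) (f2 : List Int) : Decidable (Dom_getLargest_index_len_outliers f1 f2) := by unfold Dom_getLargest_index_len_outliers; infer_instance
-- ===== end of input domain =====

-- B replaces A's per-index quadratic DP by layered peeling (BFS by chain length:
-- level k = indices where a concordant chain of length k ends; answer = deepest
-- nonempty level); same exact result, different algorithm ("alternative" objective).

-- ===== PORT A =====
-- A-side helpers: the two loop bodies of A, named so the proofs can speak about them
def aInner (f1 f2 : List Int) (i : Int) (dp : List Int) (j : Int) : List Int :=
  if (PySem.List.pyGetD f1 j 0 < PySem.List.pyGetD f1 i 0 ∧ PySem.List.pyGetD f2 j 0 < PySem.List.pyGetD f2 i 0) ∨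
     (PySem.List.pyGetD f1 j 0 > PySem.List.pyGetD f1 i 0 ∧ PySem.List.pyGetD f2 j 0 > PySem.List.pyGetD f2 i 0)
  then PySem.List.pySetD dp i (max (PySem.List.pyGetD dp i 0) (1 + PySem.List.pyGetD dp j 0))
  else dp

def aOuter (f1 f2 : List Int) (st : Int × List Int) (i : Int) : Int × List Int :=
  let dp := (PySem.List.pyRange 0 i 1).foldl (aInner f1 f2 i) st.2
  (max st.1 (PySem.List.pyGetD dp i 0), dp)

def getLargest_index_len_outliers (f1 : List Int) (f2 : List Int) : Int :=
  let n := f1.length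
  let res := (PySem.List.pyRange 0 (n : Int) 1).foldl (aOuter f1 f2) (0, List.replicate n 1)
  if res.1 > 1 then res.1 else -1

-- ===== PORT B =====
-- B-side helpers: the concordance test, one level advance (the inner scan stops
-- at j >= i, as Python's break: a takeWhile), and the while loop
-- (the Nat fuel only makes the Python 'while cur:' total; it is never exhausted)
def bConc (a b : Int × Int) : Bool :=
  decide ((a.1 < b.1 ∧ a.2 < b.2) ∨ (a.1 > b.1 ∧ a.2 > b.2))

def bHasPred (pairs : List (Int × Int)) (cur : List Nat) (i : Nat) : Bool :=
  (cur.takeWhile (fun j => decide (j < i))).any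
    (fun j => bConc (pairs.getD j (0, 0)) (pairs.getD i (0, 0)))

def bNext (pairs : List (Int × Int)) (cur : List Nat) : List Nat :=
  cur.filter (bHasPred pairs cur)

def bLoop (pairs : List (Int × Int)) : Nat → List Nat → Int → Int
  | fuel, cur, depth =>
    if cur.isEmpty then depth
    else match fuel with
      | 0 => depth
      | fuel + 1 => bLoop pairs fuel (bNext pairs cur) (depth + 1)

def getLargest_index_len_outliers_alt (f1 : List Int) (f2 : List Int) : Int :=
  let pairs := f1.zip f2
  let depth := bLoop pairs pairs.length (List.range pairs.length) 0
  if depth > 1 then depth else -1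

-- ===== PRECONDITION & SPEC =====
-- Pre_ admits exactly the inputs on which A returns: A raises IndexError iff some outer index
-- i ≥ len(f2) is compared (non-short-circuited) against an earlier unequal f1 value.
def Pre_getLargest_index_len_outliers (f1 : List Int) (f2 : List Int) : Prop :=
  ∀ i, i < f1.length → f2.length ≤ i → ∀ j, j < i → f1.getD j 0 = f1.getD i 0
instance (f1 : List Int) (f2 : List Int) : Decidable (Pre_getLargest_index_len_outliers f1 f2) := by
  unfold Pre_getLargest_index_len_outliers; infer_instance

def pvWitness_getLargest_index_len_outliers : List Int × List Int := ([1, 3, 2], [2, 5, 4])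

def Spec_getLargest_index_len_outliers (f1 : List Int) (f2 : List Int) (out : Int) : Prop :=
  out = getLargest_index_len_outliers_alt f1 f2
instance (f1 : List Int) (f2 : List Int) (out : Int) : Decidable (Spec_getLargest_index_len_outliers f1 f2 out) := by
  unfold Spec_getLargest_index_len_outliers; infer_instance

-- ===== CLAIM (what is proved, stated in full; the proofs are below) =====
def Claim_equal_getLargest_index_len_outliers : Prop := ∀ (f1 : List Int) (f2 : List Int), Dom_getLargest_index_len_outliers f1 f2 → Pre_getLargest_index_len_outliers f1 f2 → Spec_getLargest_index_len_outliers f1 f2 (getLargest_index_len_outliers f1 f2)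

-- ===== LEMMAS AND PROOFS =====

-- the concordance relation, as a Bool
def Rc (p q : Int × Int) : Bool :=
  decide ((p.1 < q.1 ∧ p.2 < q.2) ∨ (p.1 > q.1 ∧ p.2 > q.2))

-- max of a list of Ints, default 0
def m0 (l : List Int) : Int := l.foldr max 0

theorem m0_nonneg (l : List Int) : 0 ≤ m0 l := by
  induction l with
  | nil => simp [m0]
  | cons x l ih => simp only [m0, List.foldr_cons] at *; omega

theorem m0_cons (x : Int) (l : List Int) : m0 (x :: l) = max x (m0 l) := rfl

theorem m0_append (a b : List Int) : m0 (a ++ b) = max (m0 a) (m0 b) := by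
  induction a with
  | nil => have := m0_nonneg b; simp only [List.nil_append]; simp only [m0, List.foldr_nil] at *; omega
  | cons x a ih => simp only [List.cons_append, m0_cons, ih]; omega

theorem m0_append_singleton (a : List Int) (x : Int) : m0 (a ++ [x]) = max (m0 a) x := by
  have := m0_nonneg a; rw [m0_append]; simp only [m0, List.foldr_cons, List.foldr_nil] at *; omega

theorem m0_le (l : List Int) (b : Int) (hb : 0 ≤ b) (h : ∀ y ∈ l, y ≤ b) : m0 l ≤ b := by
  induction l with
  | nil => simpa [m0] using hb
  | cons x l ih =>
    have := h x (by simp)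
    have := ih (fun y hy => h y (by simp [hy]))
    simp only [m0_cons]; omega

theorem le_m0 (l : List Int) (y : Int) (h : y ∈ l) : y ≤ m0 l := by
  induction l with
  | nil => simp at h
  | cons x l ih =>
    rcases List.mem_cons.mp h with h | h
    · subst h; simp only [m0_cons]; omega
    · have := ih h; simp only [m0_cons]; omega

theorem m0_attain (l : List Int) : m0 l = 0 ∨ m0 l ∈ l := by
  induction l with
  | nil => left; rfl
  | cons x l ih =>
    simp only [m0_cons]
    rcases le_or_gt x (m0 l) with h | h
    · rw [max_eq_right h]; rcases ih with h0 | hm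
      · left; exact h0
      · right; exact List.mem_cons_of_mem _ hm
    · rw [max_eq_left (le_of_lt h)]; right; simp

-- chain predicate
abbrev chainR (c : List (Int × Int)) : Prop := List.IsChain (fun a b => Rc a b = true) c

-- spec values: Mv s x = max length of a chain-sublist of s that stays concordant when x is appended;
-- Nv t = max length of a concordant chain-sublist of t
def Mlist (s : List (Int × Int)) (x : Int × Int) : List Int :=
  (s.sublists.filter (fun c => decide (chainR (c ++ [x])))).map (fun c => (c.length : Int))
def Mv (s : List (Int × Int)) (x : Int × Int) : Int := m0 (Mlist s x)
def Nlist (t : List (Int × Int)) : List Int :=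
  (t.sublists.filter (fun c => decide (chainR c))).map (fun c => (c.length : Int))
def Nv (t : List (Int × Int)) : Int := m0 (Nlist t)

theorem mem_Mlist (s : List (Int × Int)) (x : Int × Int) (y : Int) :
    y ∈ Mlist s x ↔ ∃ c, c.Sublist s ∧ chainR (c ++ [x]) ∧ y = (c.length : Int) := by
  simp [Mlist, List.mem_filter, List.mem_sublists]
  constructor
  · rintro ⟨c, ⟨hs, hc⟩, rfl⟩; exact ⟨c, hs, hc, rfl⟩
  · rintro ⟨c, hs, hc, rfl⟩; exact ⟨c, ⟨hs, hc⟩, rfl⟩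

theorem mem_Nlist (t : List (Int × Int)) (y : Int) :
    y ∈ Nlist t ↔ ∃ c, c.Sublist t ∧ chainR c ∧ y = (c.length : Int) := by
  simp [Nlist, List.mem_filter, List.mem_sublists]
  constructor
  · rintro ⟨c, ⟨hs, hc⟩, rfl⟩; exact ⟨c, hs, hc, rfl⟩
  · rintro ⟨c, hs, hc, rfl⟩; exact ⟨c, ⟨hs, hc⟩, rfl⟩

theorem chainR_concat_iff (c : List (Int × Int)) (y x : Int × Int) :
    chainR ((c ++ [y]) ++ [x]) ↔ chainR (c ++ [y]) ∧ Rc y x = true := by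
  rw [chainR, List.isChain_append]
  simp

theorem Mv_sublist_le (s s' : List (Int × Int)) (x : Int × Int) (h : s.Sublist s') :
    Mv s x ≤ Mv s' x := by
  apply m0_le _ _ (m0_nonneg _)
  intro y hy
  rw [mem_Mlist] at hy
  obtain ⟨c, hs, hc, rfl⟩ := hy
  exact le_m0 _ _ ((mem_Mlist _ _ _).mpr ⟨c, hs.trans h, hc, rfl⟩)

theorem Mv_append_singleton (s : List (Int × Int)) (y0 x : Int × Int) :
    Mv (s ++ [y0]) x = if Rc y0 x then max (Mv s x) (1 + Mv s y0) else Mv s x := by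
  have hsub : Mv s x ≤ Mv (s ++ [y0]) x := Mv_sublist_le _ _ _ (List.sublist_append_left s [y0])
  have hub : ∀ y ∈ Mlist (s ++ [y0]) x,
      y ≤ if Rc y0 x then max (Mv s x) (1 + Mv s y0) else Mv s x := by
    intro y hy
    rw [mem_Mlist] at hy
    obtain ⟨c, hs, hc, rfl⟩ := hy
    rcases List.sublist_append_iff.mp hs with ⟨c1, c2, rfl, hc1, hc2⟩
    rcases List.sublist_singleton.mp hc2 with rfl | rfl
    · have h1 : (c1.length : Int) ≤ Mv s x := by
        apply le_m0
        rw [mem_Mlist]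
        exact ⟨c1, hc1, by simpa using hc, by simp⟩
      simp only [List.append_nil]
      split <;> omega
    · obtain ⟨hcy, hyx⟩ := (chainR_concat_iff c1 y0 x).mp hc
      rw [if_pos hyx]
      have h1 : (c1.length : Int) ≤ Mv s y0 := by
        apply le_m0
        rw [mem_Mlist]
        exact ⟨c1, hc1, hcy, rfl⟩
      simp only [List.length_append, List.length_cons, List.length_nil]
      push_cast
      omega
  have hm0 : 0 ≤ (if Rc y0 x then max (Mv s x) (1 + Mv s y0) else Mv s x) := by
    have := m0_nonneg (Mlist s x)
    have := m0_nonneg (Mlist s y0)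
    unfold Mv at *
    split <;> omega
  apply le_antisymm (m0_le _ _ hm0 hub)
  by_cases hR : Rc y0 x
  · rw [if_pos hR]
    apply max_le hsub
    rcases m0_attain (Mlist s y0) with h0 | hmem
    · have h1 : (1 : Int) ∈ Mlist (s ++ [y0]) x := by
        rw [mem_Mlist]
        refine ⟨[y0], List.sublist_append_right s [y0], ?_, by simp⟩
        show chainR (([] ++ [y0]) ++ [x])
        rw [chainR_concat_iff]
        exact ⟨by simp [chainR], hR⟩
      have := le_m0 _ _ h1
      unfold Mv at *
      omega
    · rw [mem_Mlist] at hmem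
      obtain ⟨c, hs, hc, hlen⟩ := hmem
      have h1 : ((c ++ [y0]).length : Int) ∈ Mlist (s ++ [y0]) x := by
        rw [mem_Mlist]
        refine ⟨c ++ [y0], hs.append_right _, ?_, rfl⟩
        rw [chainR_concat_iff]
        exact ⟨hc, hR⟩
      have := le_m0 _ _ h1
      simp only [List.length_append, List.length_cons, List.length_nil] at this
      push_cast at this
      unfold Mv at *
      omega
  · rw [if_neg hR]; exact hsub

theorem Nv_append_singleton (t : List (Int × Int)) (x : Int × Int) :
    Nv (t ++ [x]) = max (Nv t) (1 + Mv t x) := by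
  apply le_antisymm
  · apply m0_le
    · have := m0_nonneg (Nlist t); have := m0_nonneg (Mlist t x)
      unfold Nv Mv at *; omega
    · intro y hy
      rw [mem_Nlist] at hy
      obtain ⟨c, hs, hc, rfl⟩ := hy
      rcases List.sublist_append_iff.mp hs with ⟨c1, c2, rfl, hc1, hc2⟩
      rcases List.sublist_singleton.mp hc2 with rfl | rfl
      · have h1 : (c1.length : Int) ≤ Nv t := by
          apply le_m0; rw [mem_Nlist]; exact ⟨c1, hc1, by simpa using hc, by simp⟩
        simp only [List.append_nil]
        omega
      · have h1 : (c1.length : Int) ≤ Mv t x := by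
          apply le_m0; rw [mem_Mlist]; exact ⟨c1, hc1, hc, rfl⟩
        simp only [List.length_append, List.length_cons, List.length_nil]
        push_cast
        omega
  · apply max_le
    · apply m0_le _ _ (m0_nonneg _)
      intro y hy
      rw [mem_Nlist] at hy
      obtain ⟨c, hs, hc, rfl⟩ := hy
      exact le_m0 _ _ ((mem_Nlist _ _).mpr ⟨c, hs.trans (List.sublist_append_left t [x]), hc, rfl⟩)
    · rcases m0_attain (Mlist t x) with h0 | hmem
      · have h1 : (1 : Int) ∈ Nlist (t ++ [x]) := by
          rw [mem_Nlist]
          exact ⟨[x], List.sublist_append_right t [x], by simp [chainR], by simp⟩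
        have := le_m0 _ _ h1
        unfold Mv Nv at *
        omega
      · rw [mem_Mlist] at hmem
        obtain ⟨c, hs, hc, hlen⟩ := hmem
        have h1 : ((c ++ [x]).length : Int) ∈ Nlist (t ++ [x]) := by
          rw [mem_Nlist]
          exact ⟨c ++ [x], hs.append_right _, hc, rfl⟩
        have := le_m0 _ _ h1
        simp only [List.length_append, List.length_cons, List.length_nil] at this
        push_cast at this
        unfold Mv Nv at *
        omega

-- the forward per-index DP as a reference object: Eh l = list of (pair, chain length ending there)
def pickE (x : Int × Int) (acc : List ((Int × Int) × Int)) : Int :=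
  1 + m0 (acc.filterMap (fun qt => if Rc qt.1 x then some qt.2 else none))
def Eh (l : List (Int × Int)) : List ((Int × Int) × Int) :=
  l.foldl (fun acc x => acc ++ [(x, pickE x acc)]) []

theorem Eh_append_singleton (t : List (Int × Int)) (x : Int × Int) :
    Eh (t ++ [x]) = Eh t ++ [(x, pickE x (Eh t))] := by
  simp [Eh, List.foldl_append]

theorem Mv_nil (x : Int × Int) : Mv [] x = 0 := by
  simp [Mv, Mlist, List.sublists_nil, chainR, m0]

theorem pickE_char (t : List (Int × Int)) : ∀ x, pickE x (Eh t) = 1 + Mv t x := by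
  induction t using List.reverseRecOn with
  | nil => intro x; simp [pickE, Eh, m0, Mv_nil]
  | append_singleton s y ih =>
    intro x
    rw [Eh_append_singleton, pickE, List.filterMap_append, Mv_append_singleton]
    have hx := ih x
    have hy := ih y
    rw [pickE] at hx hy
    by_cases hR : Rc y x
    · rw [if_pos hR]
      simp only [List.filterMap_cons, List.filterMap_nil, if_pos hR, m0_append_singleton]
      have h0 : m0 ((Eh s).filterMap fun qt => if Rc qt.1 x = true then some qt.2 else none) = Mv s x := by omega
      rw [h0, ih y]
    · rw [if_neg hR]
      simp only [List.filterMap_cons, List.filterMap_nil, if_neg hR, List.append_nil]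
      omega

theorem Nv_nil : Nv [] = 0 := by
  simp [Nv, Nlist, List.sublists_nil, chainR, m0]

theorem Eh_m0_Nv (l : List (Int × Int)) : m0 ((Eh l).map (·.2)) = Nv l := by
  induction l using List.reverseRecOn with
  | nil => simp [Eh, m0, Nv_nil]
  | append_singleton t x ih =>
    rw [Eh_append_singleton, List.map_append]
    simp only [List.map_cons, List.map_nil]
    rw [m0_append_singleton, ih, Nv_append_singleton, pickE_char]

-- ===== A port characterization =====

-- list surgery helpers
theorem getD_mid (a : List Int) (w : Int) (r : List Int) : (a ++ w :: r).getD a.length 0 = w := by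
  simp [List.getD_eq_getElem?_getD]

theorem getD_left (a : List Int) (w : Int) (r : List Int) (j : Nat) (hj : j < a.length) :
    (a ++ w :: r).getD j 0 = a.getD j 0 := by
  simp [List.getD_eq_getElem?_getD, List.getElem?_append_left hj]

theorem getD_mid' (a : List Int) (w : Int) (r : List Int) (i : Nat) (h : a.length = i) :
    (a ++ w :: r).getD i 0 = w := by
  subst h; exact getD_mid _ _ _

theorem set_mid (a : List Int) (w u : Int) (r : List Int) :
    (a ++ w :: r).set a.length u = a ++ u :: r := by
  rw [List.set_append_right _ _ (le_refl _)]
  simp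

-- the Python condition seen by A's inner loop, on Nat indices
abbrev ACOND (f1 f2 : List Int) (j i : Nat) : Prop :=
  (f1.getD j 0 < f1.getD i 0 ∧ f2.getD j 0 < f2.getD i 0) ∨
  (f1.getD j 0 > f1.getD i 0 ∧ f2.getD j 0 > f2.getD i 0)

theorem aInner_natCast (f1 f2 : List Int) (i j : Nat) (dp : List Int) :
    aInner f1 f2 (i : Int) dp (j : Int) =
      if ACOND f1 f2 j i then dp.set i (max (dp.getD i 0) (1 + dp.getD j 0)) else dp := by
  rw [aInner]
  simp [ACOND, PySem.List.pyGetD_natCast, PySem.List.pySetD_natCast]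

theorem inner_char (f1 f2 : List Int) (i : Nat) (pref rest : List Int) (hl : pref.length = i) :
    ∀ (k : Nat) (v : Int), k ≤ i →
      (PySem.List.pyRange 0 (k : Int) 1).foldl (aInner f1 f2 (i : Int)) (pref ++ v :: rest)
      = pref ++ ((List.range k).foldl
          (fun w j => if ACOND f1 f2 j i then max w (1 + pref.getD j 0) else w) v) :: rest := by
  intro k
  induction k with
  | zero => intro v _; rw [show ((0 : Nat) : Int) = 0 by rfl, PySem.List.pyRange_zero]; simp
  | succ k ih =>
    intro v hk
    have hk' : k ≤ i := Nat.le_of_succ_le hk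
    have hsplit : PySem.List.pyRange 0 ((k + 1 : Nat) : Int) 1
        = PySem.List.pyRange 0 (k : Int) 1 ++ [(k : Int)] := by
      push_cast
      exact PySem.List.pyRange_one_succ_right (by positivity)
    rw [hsplit, List.foldl_append, ih v hk']
    set w := (List.range k).foldl
        (fun w j => if ACOND f1 f2 j i then max w (1 + pref.getD j 0) else w) v with hw
    rw [List.foldl_cons, List.foldl_nil, aInner_natCast]
    rw [List.range_succ, List.foldl_append, List.foldl_cons, List.foldl_nil, ← hw]
    by_cases h : ACOND f1 f2 k i
    · rw [if_pos h, if_pos h]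
      have hkl : k < pref.length := by omega
      rw [← hl, getD_mid, getD_left _ _ _ _ hkl, set_mid]
    · rw [if_neg h, if_neg h]

theorem foldl_if_false (c : Nat → Prop) [DecidablePred c] (g : Nat → Int)
    (ks : List Nat) (v : Int) (h : ∀ j ∈ ks, ¬ c j) :
    ks.foldl (fun w j => if c j then max w (1 + g j) else w) v = v := by
  induction ks generalizing v with
  | nil => rfl
  | cons j ks ih =>
    rw [List.foldl_cons, if_neg (h j (by simp))]
    exact ih _ (fun j hj => h j (by simp [hj]))

theorem foldl_max_char (c : Nat → Prop) [DecidablePred c] (g : Nat → Int) (ks : List Nat) :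
    ks.foldl (fun w j => if c j then max w (1 + g j) else w) 1
      = 1 + m0 (ks.filterMap (fun j => if c j then some (g j) else none)) := by
  induction ks using List.reverseRecOn with
  | nil => simp [m0]
  | append_singleton ks j ih =>
    rw [List.foldl_append, List.foldl_cons, List.foldl_nil, ih, List.filterMap_append]
    by_cases h : c j
    · rw [if_pos h]
      simp only [List.filterMap_cons, List.filterMap_nil, if_pos h]
      rw [m0_append_singleton]
      omega
    · rw [if_neg h]
      simp only [List.filterMap_cons, List.filterMap_nil, if_neg h, List.append_nil]

theorem filterMap_range_eq (acc : List ((Int × Int) × Int)) (P : (Int × Int) → Prop)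
    [DecidablePred P] :
    (List.range acc.length).filterMap (fun j =>
        if P ((acc.getD j ((0, 0), 0)).1) then some ((acc.getD j ((0, 0), 0)).2) else none)
      = acc.filterMap (fun qt => if P qt.1 then some qt.2 else none) := by
  induction acc using List.reverseRecOn with
  | nil => simp
  | append_singleton acc q ih =>
    rw [List.length_append, List.length_cons, List.length_nil, List.range_succ,
      List.filterMap_append, List.filterMap_append]
    congr 1
    · rw [← ih]
      apply List.filterMap_congr
      intro j hj
      rw [List.mem_range] at hj
      have h2 : (acc ++ [q]).getD j ((0, 0), 0) = acc.getD j ((0, 0), 0) := by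
        simp [List.getD_eq_getElem?_getD, List.getElem?_append_left hj]
      rw [h2]
    · have h2 : (acc ++ [q]).getD acc.length ((0, 0), 0) = q := by
        simp [List.getD_eq_getElem?_getD]
      simp only [List.filterMap_cons, List.filterMap_nil, h2]

-- structure of Eh
theorem Eh_structure (t : List (Int × Int)) :
    (Eh t).length = t.length ∧ (Eh t).map (·.1) = t := by
  induction t using List.reverseRecOn with
  | nil => simp [Eh]
  | append_singleton t x ih =>
    rw [Eh_append_singleton]
    constructor
    · simp [ih.1]
    · rw [List.map_append, ih.2]; simp

-- value computed by A's inner loop at index i, for i inside the zipped region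
theorem inner_value (f1 f2 : List Int) (i : Nat) (hik : i < (f1.zip f2).length) :
    1 + m0 ((List.range i).filterMap (fun j =>
        if ACOND f1 f2 j i then some (((Eh ((f1.zip f2).take i)).map (·.2)).getD j 0) else none))
      = pickE ((f1.zip f2)[i]) (Eh ((f1.zip f2).take i)) := by
  have hlt : (f1.zip f2).length = min f1.length f2.length := List.length_zip ..
  have hacc_len : (Eh ((f1.zip f2).take i)).length = i := by
    rw [(Eh_structure _).1, List.length_take]
    omega
  have hfst := (Eh_structure ((f1.zip f2).take i)).2
  rw [pickE]
  congr 1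
  conv_lhs => rw [show List.range i = List.range (Eh ((f1.zip f2).take i)).length from by
    rw [hacc_len]]
  rw [← filterMap_range_eq (Eh ((f1.zip f2).take i)) (fun q => Rc q ((f1.zip f2)[i]) = true)]
  congr 1
  apply List.filterMap_congr
  intro j hj
  rw [List.mem_range, hacc_len] at hj
  set acc := Eh ((f1.zip f2).take i) with hacc
  have hj' : j < acc.length := by omega
  have hval : ((acc.map (·.2)).getD j 0) = (acc.getD j ((0, 0), 0)).2 := by
    rw [List.getD_eq_getElem _ _ (by simpa using hj'), List.getD_eq_getElem _ _ hj']
    simp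
  have hfst' : (acc.getD j ((0, 0), 0)).1 = (f1.zip f2)[j] := by
    rw [List.getD_eq_getElem _ _ hj']
    have h3 : (acc.map (·.1))[j]'(by simpa using hj') = ((f1.zip f2).take i)[j]'(by
        rw [List.length_take]; omega) := List.getElem_of_eq hfst _
    rw [List.getElem_map] at h3
    rw [h3, List.getElem_take]
  have hj1 : j < f1.length := by omega
  have hj2 : j < f2.length := by omega
  have hi1 : i < f1.length := by omega
  have hi2 : i < f2.length := by omega
  have hcond : ACOND f1 f2 j i ↔ (Rc (acc.getD j ((0, 0), 0)).1 ((f1.zip f2)[i]) = true) := by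
    rw [hfst', Rc, decide_eq_true_iff, List.getElem_zip, List.getElem_zip]
    unfold ACOND
    rw [List.getD_eq_getElem _ _ hj1, List.getD_eq_getElem _ _ hi1,
      List.getD_eq_getElem _ _ hj2, List.getD_eq_getElem _ _ hi2]
  exact if_congr hcond (by rw [hval]) rfl

theorem m0_replicate_one_le (r : Nat) : m0 (List.replicate r 1) ≤ 1 := by
  induction r with
  | zero => simp [m0]
  | succ r ih => rw [List.replicate_succ, m0_cons]; omega

theorem outer_char (f1 f2 : List Int) (hpre : Pre_getLargest_index_len_outliers f1 f2) :
    ∀ i, i ≤ f1.length →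
      (PySem.List.pyRange 0 (i : Int) 1).foldl (aOuter f1 f2) (0, List.replicate f1.length 1)
      = (m0 ((Eh ((f1.zip f2).take i)).map (·.2) ++ List.replicate (i - (f1.zip f2).length) 1),
         (Eh ((f1.zip f2).take i)).map (·.2)
           ++ List.replicate (f1.length - min i (f1.zip f2).length) 1) := by
  have hlt : (f1.zip f2).length = min f1.length f2.length := List.length_zip ..
  intro i
  induction i with
  | zero =>
    intro _
    rw [show ((0 : Nat) : Int) = 0 by rfl, PySem.List.pyRange_zero]
    simp [Eh, m0]
  | succ i ih =>
    intro hi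
    have hi' : i ≤ f1.length := by omega
    have hsplit : PySem.List.pyRange 0 ((i + 1 : Nat) : Int) 1
        = PySem.List.pyRange 0 (i : Int) 1 ++ [(i : Int)] := by
      push_cast
      exact PySem.List.pyRange_one_succ_right (by positivity)
    rw [hsplit, List.foldl_append, ih hi', List.foldl_cons, List.foldl_nil, aOuter]
    set l := f1.zip f2 with hl
    set k := l.length with hk
    by_cases hik : i < k
    · -- inside the zipped region: the inner loop computes a fresh chain length
      have hELlen : ((Eh (l.take i)).map (·.2)).length = i := by
        rw [List.length_map, (Eh_structure _).1, List.length_take]; omega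
      have hik0 : i - k = 0 := by omega
      have hrepl : List.replicate (f1.length - min i k) (1 : Int)
          = 1 :: List.replicate (f1.length - i - 1) 1 := by
        rw [min_eq_left (by omega), show f1.length - i = (f1.length - i - 1) + 1 by omega,
          List.replicate_succ]
        simp
      rw [hrepl, inner_char f1 f2 i _ _ hELlen i 1 (le_refl i), foldl_max_char, inner_value f1 f2 i hik]
      set e := pickE (l[i]) (Eh (l.take i)) with he
      have htake : l.take (i + 1) = l.take i ++ [l[i]] := by
        rw [List.take_add_one, List.getElem?_eq_getElem hik]
        rfl
      have hEL1 : (Eh (l.take (i + 1))).map (·.2) = (Eh (l.take i)).map (·.2) ++ [e] := by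
        rw [htake, Eh_append_singleton, List.map_append]
        rfl
      rw [Prod.mk.injEq]
      constructor
      · rw [PySem.List.pyGetD_natCast, getD_mid' _ _ _ _ hELlen, hEL1, hik0, List.replicate_zero,
          List.append_nil, show i + 1 - k = 0 by omega, List.replicate_zero, List.append_nil,
          m0_append_singleton]
      · rw [hEL1, min_eq_left (by omega), List.append_assoc, List.singleton_append,
          show f1.length - (i + 1) = f1.length - i - 1 by omega]
    · -- past the zipped pairs: Pre_ forces equal f1 values, the inner loop is a no-op
      have hkm : f2.length ≤ i := by omega
      have hin : i < f1.length := by omega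
      have hall : ∀ j, j < i → f1.getD j 0 = f1.getD i 0 := hpre i hin hkm
      have hfalse : ∀ j ∈ List.range i, ¬ ACOND f1 f2 j i := by
        intro j hj
        rw [List.mem_range] at hj
        rw [ACOND, hall j hj]
        omega
      have htake : l.take i = l := List.take_of_length_le (by omega)
      have htake1 : l.take (i + 1) = l := List.take_of_length_le (by omega)
      have hELlen : ((Eh l).map (·.2)).length = k := by
        rw [List.length_map, (Eh_structure _).1]
      have hmin : min i k = k := by omega
      have hdecomp : List.replicate (f1.length - k) (1 : Int)
          = List.replicate (i - k) 1 ++ 1 :: List.replicate (f1.length - i - 1) 1 := by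
        rw [show f1.length - k = (i - k) + ((f1.length - i - 1) + 1) by omega,
          List.replicate_add, List.replicate_succ]
      have hpl : ((Eh l).map (·.2) ++ List.replicate (i - k) (1 : Int)).length = i := by
        rw [List.length_append, hELlen, List.length_replicate]; omega
      rw [htake, hmin, hdecomp, ← List.append_assoc,
        inner_char f1 f2 i _ _ hpl i 1 (le_refl i),
        foldl_if_false _ _ _ _ hfalse]
      rw [Prod.mk.injEq]
      constructor
      · rw [PySem.List.pyGetD_natCast, getD_mid' _ _ _ _ hpl, htake1,
          show i + 1 - k = (i - k) + 1 by omega, List.replicate_succ',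
          ← List.append_assoc, m0_append_singleton]
      · rw [htake1, min_eq_right (by omega), List.append_assoc, ← hdecomp]

-- ===== B port characterization (layered peeling = max of the per-index DP values) =====

theorem Eh_prefix (l : List (Int × Int)) (i : Nat) : Eh (l.take i) = (Eh l).take i := by
  induction l using List.reverseRecOn with
  | nil => simp [Eh]
  | append_singleton t x ih =>
    rw [Eh_append_singleton]
    by_cases h : i ≤ t.length
    · rw [List.take_append_of_le_length h, ih,
        List.take_append_of_le_length (by rw [(Eh_structure t).1]; exact h)]
    · rw [List.take_of_length_le (by simp; omega), Eh_append_singleton,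
        List.take_of_length_le (by simp [(Eh_structure t).1]; omega)]

-- the score list S and its pointwise characterisation
theorem S_get (l : List (Int × Int)) (i : Nat) (hi : i < l.length) :
    ((Eh l).map (·.2)).getD i 0 = pickE (l.getD i (0, 0)) (Eh (l.take i)) := by
  have htake : l.take (i + 1) = l.take i ++ [l.getD i (0, 0)] := by
    rw [List.take_add_one, List.getElem?_eq_getElem hi, List.getD_eq_getElem _ _ hi]
    rfl
  have h1 : (Eh l).take (i + 1)
      = Eh (l.take i) ++ [(l.getD i (0, 0), pickE (l.getD i (0, 0)) (Eh (l.take i)))] := by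
    rw [← Eh_prefix, htake, Eh_append_singleton]
  have hlen : ((Eh (l.take i)).map (·.2)).length = i := by
    rw [List.length_map, (Eh_structure _).1, List.length_take]; omega
  have h2 : ((Eh l).map (·.2))[i]? = some (pickE (l.getD i (0, 0)) (Eh (l.take i)))
      := by
    calc ((Eh l).map (·.2))[i]?
        = (((Eh l).map (·.2)).take (i + 1))[i]? := (List.getElem?_take_of_lt (by omega)).symm
      _ = (((Eh l).take (i + 1)).map (·.2))[i]? := by rw [List.map_take]
      _ = ((Eh (l.take i)).map (·.2)
            ++ [pickE (l.getD i (0, 0)) (Eh (l.take i))])[i]? := by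
            rw [h1, List.map_append]; rfl
      _ = some (pickE (l.getD i (0, 0)) (Eh (l.take i))) := by
            rw [List.getElem?_append_right (by omega)]
            simp [hlen]
  rw [List.getD_eq_getElem?_getD, h2]
  rfl

theorem S_pos (l : List (Int × Int)) (i : Nat) (hi : i < l.length) :
    1 ≤ ((Eh l).map (·.2)).getD i 0 := by
  rw [S_get l i hi, pickE]
  have := m0_nonneg ((Eh (l.take i)).filterMap
    (fun qt => if Rc qt.1 (l.getD i (0, 0)) then some qt.2 else none))
  omega

theorem Mv_le_length (s : List (Int × Int)) (x : Int × Int) : Mv s x ≤ (s.length : Int) := by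
  apply m0_le _ _ (by positivity)
  intro y hy
  rw [mem_Mlist] at hy
  obtain ⟨c, hs, _, rfl⟩ := hy
  exact_mod_cast hs.length_le

theorem S_bound (l : List (Int × Int)) (i : Nat) (hi : i < l.length) :
    ((Eh l).map (·.2)).getD i 0 ≤ (l.length : Int) := by
  rw [S_get l i hi, pickE_char]
  have h := Mv_le_length (l.take i) (l.getD i (0, 0))
  rw [List.length_take] at h
  have : (min i l.length : Int) ≤ (l.length : Int) - 1 := by
    have : min i l.length ≤ l.length - 1 := by omega
    omega
  omega

-- the score recurrence: S i ≥ k+1 iff some concordant predecessor has score ≥ k (k ≥ 1)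
theorem S_recurrence (l : List (Int × Int)) (i : Nat) (hi : i < l.length) (k : Int) (hk : 1 ≤ k) :
    (k + 1 ≤ ((Eh l).map (·.2)).getD i 0)
      ↔ ∃ j, j < i ∧ Rc (l.getD j (0, 0)) (l.getD i (0, 0)) = true
              ∧ k ≤ ((Eh l).map (·.2)).getD j 0 := by
  rw [S_get l i hi, pickE]
  set fm := (Eh (l.take i)).filterMap
      (fun qt => if Rc qt.1 (l.getD i (0, 0)) then some qt.2 else none) with hfm
  have hmem : ∀ y, y ∈ fm ↔ ∃ j, j < i ∧ Rc (l.getD j (0, 0)) (l.getD i (0, 0)) = true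
      ∧ y = ((Eh l).map (·.2)).getD j 0 := by
    intro y
    rw [hfm, List.mem_filterMap]
    constructor
    · rintro ⟨qt, hqt, hy⟩
      by_cases hR : Rc qt.1 (l.getD i (0, 0)) = true
      · rw [if_pos hR, Option.some.injEq] at hy
        obtain ⟨j, hjlt, hget⟩ := List.mem_iff_getElem.mp hqt
        have hjlen : j < i := by
          have := hjlt; rw [(Eh_structure _).1, List.length_take] at this; omega
        refine ⟨j, hjlen, ?_, ?_⟩
        · -- qt.1 = l[j]
          have hq1 : qt.1 = l.getD j (0, 0) := by
            have hfst := (Eh_structure (l.take i)).2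
            have hjt : j < (l.take i).length := by rw [List.length_take]; omega
            have h3 : ((Eh (l.take i)).map (·.1))[j]'(by simpa using hjlt)
                = (l.take i)[j]'hjt := List.getElem_of_eq hfst _
            rw [List.getElem_map] at h3
            have hq : (Eh (l.take i))[j]'hjlt = qt := hget
            rw [hq] at h3
            rw [h3, List.getElem_take, List.getD_eq_getElem _ _ (by omega)]
          rwa [← hq1]
        · -- qt.2 = S j
          have hjl : j < l.length := by omega
          have hq2 : qt.2 = ((Eh l).map (·.2)).getD j 0 := by
            have hjE : j < (Eh l).length := by rw [(Eh_structure l).1]; omega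
            have h4 : (Eh (l.take i))[j]'hjlt = (Eh l)[j]'hjE := by
              rw [List.getElem_of_eq (Eh_prefix l i) hjlt, List.getElem_take]
            rw [List.getD_eq_getElem _ _ (by simpa using hjE), List.getElem_map, ← h4, hget]
          rw [← hy, hq2]
      · rw [if_neg hR] at hy; exact absurd hy (by simp)
    · rintro ⟨j, hji, hR, rfl⟩
      have hjlt : j < (Eh (l.take i)).length := by
        rw [(Eh_structure _).1, List.length_take]; omega
      refine ⟨(Eh (l.take i))[j], List.getElem_mem _, ?_⟩
      have hq1 : ((Eh (l.take i))[j]).1 = l.getD j (0, 0) := by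
        have hfst := (Eh_structure (l.take i)).2
        have hjt : j < (l.take i).length := by rw [List.length_take]; omega
        have h3 : ((Eh (l.take i)).map (·.1))[j]'(by simpa using hjlt)
            = (l.take i)[j]'hjt := List.getElem_of_eq hfst _
        rw [List.getElem_map] at h3
        rw [h3, List.getElem_take, List.getD_eq_getElem _ _ (by omega)]
      have hq2 : ((Eh (l.take i))[j]).2 = ((Eh l).map (·.2)).getD j 0 := by
        have hjE : j < (Eh l).length := by rw [(Eh_structure l).1]; omega
        have h4 : (Eh (l.take i))[j]'hjlt = (Eh l)[j]'hjE := by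
          rw [List.getElem_of_eq (Eh_prefix l i) hjlt, List.getElem_take]
        rw [List.getD_eq_getElem _ _ (by simpa using hjE), List.getElem_map, h4]
      rw [hq1, if_pos hR, hq2]
  constructor
  · intro h
    have hm : k ≤ m0 fm := by omega
    rcases m0_attain fm with h0 | hmem'
    · omega
    · obtain ⟨j, hji, hR, hy⟩ := (hmem (m0 fm)).mp hmem'
      exact ⟨j, hji, hR, by omega⟩
  · rintro ⟨j, hji, hR, hSj⟩
    have : ((Eh l).map (·.2)).getD j 0 ∈ fm := (hmem _).mpr ⟨j, hji, hR, rfl⟩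
    have := le_m0 _ _ this
    omega

-- the level sets
def Sge (l : List (Int × Int)) (k : Int) : List Nat :=
  (List.range l.length).filter (fun i => decide (k ≤ ((Eh l).map (·.2)).getD i 0))

theorem Sge_one (l : List (Int × Int)) : Sge l 1 = List.range l.length := by
  unfold Sge
  rw [List.filter_eq_self]
  intro i hi
  rw [List.mem_range] at hi
  simpa using S_pos l i hi

theorem Sge_empty_iff (l : List (Int × Int)) (k : Int) :
    (Sge l k).isEmpty = true ↔ ∀ i, i < l.length → ((Eh l).map (·.2)).getD i 0 < k := by
  unfold Sge
  rw [List.isEmpty_iff, List.filter_eq_nil_iff]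
  constructor
  · intro h i hi
    have := h i (List.mem_range.mpr hi)
    simpa using this
  · intro h i hi
    rw [List.mem_range] at hi
    simpa using not_le.mpr (h i hi)

theorem bConc_eq_Rc (a b : Int × Int) : bConc a b = Rc a b := rfl

theorem mem_takeWhile_lt (cur : List Nat) (h : cur.Pairwise (· < ·)) (i j : Nat) :
    j ∈ cur.takeWhile (fun j => decide (j < i)) ↔ j ∈ cur ∧ j < i := by
  induction cur with
  | nil => simp
  | cons a t ih =>
    rw [List.pairwise_cons] at h
    by_cases ha : a < i
    · rw [List.takeWhile_cons, if_pos (by simpa using ha)]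
      simp only [List.mem_cons, ih h.2]
      constructor
      · rintro (rfl | ⟨hm, hj⟩)
        · exact ⟨Or.inl rfl, ha⟩
        · exact ⟨Or.inr hm, hj⟩
      · rintro ⟨(rfl | hm), hj⟩
        · exact Or.inl rfl
        · exact Or.inr ⟨hm, hj⟩
    · rw [List.takeWhile_cons, if_neg (by simpa using ha)]
      simp only [List.not_mem_nil, false_iff, List.mem_cons]
      rintro ⟨(rfl | hm), hj⟩
      · exact ha hj
      · exact ha (lt_trans (h.1 j hm) hj)

theorem Sge_sorted (l : List (Int × Int)) (k : Int) : (Sge l k).Pairwise (· < ·) :=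
  List.Pairwise.filter _ (List.pairwise_lt_range)

theorem bNext_Sge (l : List (Int × Int)) (k : Int) (hk : 1 ≤ k) :
    bNext l (Sge l k) = Sge l (k + 1) := by
  have hsorted := Sge_sorted l k
  have hstep : Sge l (k + 1)
      = (Sge l k).filter (fun i => decide (k + 1 ≤ ((Eh l).map (·.2)).getD i 0)) := by
    unfold Sge
    rw [List.filter_filter]
    apply List.filter_congr
    intro i _
    rw [Bool.eq_iff_iff, Bool.and_eq_true]
    simp only [decide_eq_true_iff]
    omega
  rw [bNext, hstep]
  apply List.filter_congr
  intro i hmi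
  have hi : i < l.length ∧ k ≤ ((Eh l).map (·.2)).getD i 0 := by
    simp only [Sge, List.mem_filter, List.mem_range, decide_eq_true_iff] at hmi
    exact hmi
  have hrec := S_recurrence l i hi.1 k hk
  rw [bHasPred, Bool.eq_iff_iff, List.any_eq_true, decide_eq_true_iff]
  constructor
  · rintro ⟨j, hj, hb⟩
    rw [bConc_eq_Rc] at hb
    rw [mem_takeWhile_lt _ hsorted] at hj
    obtain ⟨hjmem, hji⟩ := hj
    simp only [Sge, List.mem_filter, List.mem_range, decide_eq_true_iff] at hjmem
    exact hrec.mpr ⟨j, hji, hb, hjmem.2⟩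
  · intro hSi
    obtain ⟨j, hji, hR, hSj⟩ := hrec.mp hSi
    refine ⟨j, ?_, by rw [bConc_eq_Rc]; exact hR⟩
    rw [mem_takeWhile_lt _ hsorted]
    refine ⟨?_, hji⟩
    simp only [Sge, List.mem_filter, List.mem_range, decide_eq_true_iff]
    exact ⟨by omega, hSj⟩

theorem bLoop_char (l : List (Int × Int)) (hne : 0 < l.length) :
    ∀ (fuel : Nat) (k d : Int), 1 ≤ k → m0 ((Eh l).map (·.2)) ≤ k - 1 + fuel →
      bLoop l fuel (Sge l k) d = d + max (m0 ((Eh l).map (·.2)) - k + 1) 0 := by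
  have hS0mem : ((Eh l).map (·.2)).getD 0 0 ∈ (Eh l).map (·.2) := by
    rw [List.getD_eq_getElem _ _ (by simp [(Eh_structure l).1]; omega)]
    exact List.getElem_mem _
  have hMmem : m0 ((Eh l).map (·.2)) ∈ ((Eh l).map (·.2)) := by
    rcases m0_attain ((Eh l).map (·.2)) with h0 | h
    · exfalso
      have h1 := S_pos l 0 hne
      have h2 := le_m0 _ _ hS0mem
      omega
    · exact h
  have hMub : ∀ y ∈ (Eh l).map (·.2), y ≤ m0 ((Eh l).map (·.2)) := fun y hy => le_m0 _ _ hy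
  set M := m0 ((Eh l).map (·.2)) with hM
  have hSgetD : ∀ j : Nat, j < l.length → ((Eh l).map (·.2)).getD j 0 ∈ (Eh l).map (·.2) := by
    intro j hj
    rw [List.getD_eq_getElem _ _ (by simp [(Eh_structure l).1]; omega)]
    exact List.getElem_mem _
  -- M is attained at some index
  obtain ⟨jM, hjM⟩ : ∃ j : Nat, j < l.length ∧ ((Eh l).map (·.2)).getD j 0 = M := by
    obtain ⟨j, hjlt, hget⟩ := List.mem_iff_getElem.mp hMmem
    have hjl : j < l.length := by
      have := hjlt; simp [(Eh_structure l).1] at this; omega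
    refine ⟨j, hjl, ?_⟩
    rw [List.getD_eq_getElem _ _ hjlt]
    exact hget
  intro fuel
  induction fuel with
  | zero =>
    intro k d hk hfuel
    have hempty : (Sge l k).isEmpty = true := by
      rw [Sge_empty_iff]
      intro i hi
      have := hMub _ (hSgetD i hi)
      omega
    rw [bLoop, if_pos hempty]
    have : M - k + 1 ≤ 0 := by omega
    omega
  | succ fuel ih =>
    intro k d hk hfuel
    by_cases hempty : (Sge l k).isEmpty = true
    · rw [bLoop, if_pos hempty]
      rw [Sge_empty_iff] at hempty
      have := hempty jM hjM.1
      have : M < k := by omega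
      omega
    · rw [bLoop, if_neg hempty]
      rw [bNext_Sge l k hk]
      rw [ih (k + 1) (d + 1) (by omega) (by omega)]
      -- Sge k nonempty means some score ≥ k, hence M ≥ k
      have hMk : k ≤ M := by
        obtain ⟨i, hi⟩ := List.exists_mem_of_ne_nil _ ((List.isEmpty_iff).not.mp hempty)
        rw [Sge, List.mem_filter, List.mem_range, decide_eq_true_iff] at hi
        have := hMub _ (hSgetD i hi.1)
        omega
      omega

theorem alt_eq_Nv (f1 f2 : List Int) :
    getLargest_index_len_outliers_alt f1 f2 =
      (if Nv (f1.zip f2) > 1 then Nv (f1.zip f2) else -1) := by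
  rw [getLargest_index_len_outliers_alt]
  set l := f1.zip f2 with hl
  rcases Nat.eq_zero_or_pos l.length with h0 | hpos
  · have hnil : l = [] := List.eq_nil_of_length_eq_zero h0
    rw [hnil]
    simp [bLoop, Nv_nil]
  · have hM := Eh_m0_Nv l
    have hbound : m0 ((Eh l).map (·.2)) ≤ (1 : Int) - 1 + (l.length : Nat) := by
      apply m0_le _ _ (by positivity)
      intro y hy
      obtain ⟨j, hjlt, hget⟩ := List.mem_iff_getElem.mp hy
      have hjl : j < l.length := by
        have := hjlt; simp [(Eh_structure l).1] at this; omega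
      have := S_bound l j hjl
      rw [List.getD_eq_getElem _ _ hjlt] at this
      rw [← hget]
      omega
    have hchar := bLoop_char l hpos l.length 1 0 (le_refl 1) hbound
    rw [← Sge_one l] at *
    rw [hchar, hM]
    have hNv1 : 1 ≤ Nv l := by
      rw [← hM]
      have h1 := S_pos l 0 hpos
      refine le_trans h1 (le_m0 _ _ ?_)
      rw [List.getD_eq_getElem _ _ (by simp [(Eh_structure l).1]; omega)]
      exact List.getElem_mem _
    rw [show (0 : Int) + max (Nv l - 1 + 1) 0 = Nv l by omega]

-- ===== VERDICT (by name: the statement is the Claim_ definition above) =====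
theorem getLargest_index_len_outliers_spec : Claim_equal_getLargest_index_len_outliers := by
  intro f1 f2 _ hpre
  unfold Spec_getLargest_index_len_outliers
  rw [alt_eq_Nv, getLargest_index_len_outliers]
  have hchar := outer_char f1 f2 hpre f1.length (le_refl _)
  rw [hchar]
  set l := f1.zip f2 with hl
  have hlt : l.length = min f1.length f2.length := List.length_zip ..
  have htake : l.take f1.length = l := List.take_of_length_le (by omega)
  rw [htake]
  rw [m0_append, Eh_m0_Nv]
  have h0 : 0 ≤ Nv l := m0_nonneg _
  have h1 : m0 (List.replicate (f1.length - l.length) (1 : Int)) ≤ 1 :=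
    m0_replicate_one_le _
  have h2 : 0 ≤ m0 (List.replicate (f1.length - l.length) (1 : Int)) := m0_nonneg _
  rcases le_total (Nv l) (m0 (List.replicate (f1.length - l.length) (1 : Int))) with h | h
  · rw [max_eq_right h]
    have hle : Nv l ≤ 1 := le_trans h h1
    rw [if_neg (by omega), if_neg (by omega)]
  · rw [max_eq_left h]
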